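-- pv_equiv track=rewrite | github.com/smicho01/python-algorithms | exams/2021.py | GrowingSum
-- ===== SOURCE A (Python) =====
-- def GrowingSum(n):
--     i = 0
--     myList = []
--     sum = 0
--     while(sum <= 2 * n - 2):
--         i = 0
--         while(i < n):
--             j = 0
--             while(j < n):
--                 if(i+j == sum):
--                     myList.append((i, j))
--                 j = j + 1
--             i = i + 1
--         sum = sum + 1
--     return myList
-- ===== SOURCE B (Python) =====
-- def GrowingSum(n):
--     return [(i, s - i)
--             for s in range(2 * n - 1)
--             for i in range(max(0, s - n + 1), min(n, s + 1))]
-- ===== Notes on version B (the rewrite author's own statement) =====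
-- stated objective: faster
-- what changed: Instead of A's accumulator loop that re-scans all n^2 (i,j) pairs for every target sum, B is a single flat comprehension that, for each sum s, directly enumerates the valid i in [max(0,s-n+1), min(n,s+1)) with j = s - i.
import Mathlib
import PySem

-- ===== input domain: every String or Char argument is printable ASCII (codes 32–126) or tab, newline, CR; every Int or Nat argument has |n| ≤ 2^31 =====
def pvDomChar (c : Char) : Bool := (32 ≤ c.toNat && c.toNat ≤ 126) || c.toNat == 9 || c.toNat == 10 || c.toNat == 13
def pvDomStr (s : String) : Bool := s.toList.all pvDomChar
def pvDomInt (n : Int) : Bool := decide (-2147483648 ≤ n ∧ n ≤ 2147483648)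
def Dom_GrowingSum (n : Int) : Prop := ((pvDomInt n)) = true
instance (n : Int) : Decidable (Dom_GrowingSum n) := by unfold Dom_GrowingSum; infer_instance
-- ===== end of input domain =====

-- B replaces A's accumulator loop that re-scans all n^2 pairs for each sum by one flat
-- comprehension that enumerates, per sum s, the valid i-window with j = s - i.

-- ===== PORT A =====
-- A's three counting while-loops (sum from 0 while sum <= 2n-2; i from 0 while i < n;
-- j from 0 while j < n), appending into myList, transliterated as folds over integer ranges.
def GrowingSum (n : Int) : List (Int × Int) :=
  (PySem.List.pyRange 0 (2 * n - 1) 1).foldl (fun acc s =>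
    (PySem.List.pyRange 0 n 1).foldl (fun acc i =>
      (PySem.List.pyRange 0 n 1).foldl (fun acc j =>
        if i + j = s then acc ++ [(i, j)] else acc) acc) acc) []

-- ===== PORT B =====
-- Source B's nested comprehension: flatMap over the sums, map over the clipped i-window.
def GrowingSum_alt (n : Int) : List (Int × Int) :=
  (PySem.List.pyRange 0 (2 * n - 1) 1).flatMap (fun s =>
    (PySem.List.pyRange (max 0 (s - n + 1)) (min n (s + 1)) 1).map (fun i => (i, s - i)))

-- ===== PRECONDITION & SPEC =====
def Spec_GrowingSum (n : Int) (out : List (Int × Int)) : Prop := out = GrowingSum_alt n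
instance (n : Int) (out : List (Int × Int)) : Decidable (Spec_GrowingSum n out) := by unfold Spec_GrowingSum; infer_instance

-- ===== CLAIM (what is proved, stated in full; the proofs are below) =====
def Claim_equal_GrowingSum : Prop := ∀ (n : Int), Dom_GrowingSum n → Spec_GrowingSum n (GrowingSum n)

-- ===== LEMMAS AND PROOFS =====

-- Filtering an integer range [a,b) by membership in the window [lo,hi) is the clipped range.
theorem pv_filter_window (a b lo hi : Int) :
    (PySem.List.pyRange a b 1).filter (fun i => decide (lo ≤ i ∧ i < hi))
      = PySem.List.pyRange (max a lo) (min b hi) 1 := by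
  by_cases h : min b hi ≤ max a lo
  · rw [PySem.List.pyRange_one_eq_nil h, List.filter_eq_nil_iff]
    intro i hi'
    rw [PySem.List.mem_pyRange_one] at hi'
    simp only [decide_eq_true_eq]
    omega
  · rw [PySem.List.pyRange_one_append a (max a lo) b (by omega) (by omega),
        PySem.List.pyRange_one_append (max a lo) (min b hi) b (by omega) (by omega),
        List.filter_append, List.filter_append]
    have h1 : (PySem.List.pyRange a (max a lo) 1).filter (fun i => decide (lo ≤ i ∧ i < hi)) = [] := by
      rw [List.filter_eq_nil_iff]; intro i hi'
      rw [PySem.List.mem_pyRange_one] at hi'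
      simp only [decide_eq_true_eq]; omega
    have h3 : (PySem.List.pyRange (min b hi) b 1).filter (fun i => decide (lo ≤ i ∧ i < hi)) = [] := by
      rw [List.filter_eq_nil_iff]; intro i hi'
      rw [PySem.List.mem_pyRange_one] at hi'
      simp only [decide_eq_true_eq]; omega
    have h2 : (PySem.List.pyRange (max a lo) (min b hi) 1).filter (fun i => decide (lo ≤ i ∧ i < hi))
        = PySem.List.pyRange (max a lo) (min b hi) 1 := by
      rw [List.filter_eq_self]; intro i hi'
      rw [PySem.List.mem_pyRange_one] at hi'
      simp only [decide_eq_true_eq]; omega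
    rw [h1, h2, h3, List.nil_append, List.append_nil]

-- A's innermost j-scan appends (i, s-i) exactly when s-i lies in [0,n).
theorem pv_inner (n s i : Int) (acc : List (Int × Int)) :
    (PySem.List.pyRange 0 n 1).foldl (fun acc j =>
        if i + j = s then acc ++ [(i, j)] else acc) acc
      = if 0 ≤ s - i ∧ s - i < n then acc ++ [(i, s - i)] else acc := by
  rw [PySem.List.foldl_append_ite (p := fun j => i + j = s) (f := fun j => ((i, j) : Int × Int))]
  have hf : (PySem.List.pyRange 0 n 1).filter (fun j => decide (i + j = s))
      = PySem.List.pyRange (max 0 (s - i)) (min n (s - i + 1)) 1 := by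
    rw [List.filter_congr (fun j _ =>
      decide_eq_decide.mpr (by omega : (i + j = s) ↔ (s - i ≤ j ∧ j < s - i + 1)))]
    exact pv_filter_window 0 n (s - i) (s - i + 1)
  rw [hf]
  by_cases hc : 0 ≤ s - i ∧ s - i < n
  · rw [if_pos hc]
    have hmax : max 0 (s - i) = s - i := by omega
    have hmin : min n (s - i + 1) = s - i + 1 := by omega
    rw [hmax, hmin, PySem.List.pyRange_one_singleton]
    simp
  · rw [if_neg hc, PySem.List.pyRange_one_eq_nil (by omega)]
    simp

-- For a fixed sum s, A's double scan appends exactly B's block for s.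
theorem pv_body (n s : Int) (acc : List (Int × Int)) :
    (PySem.List.pyRange 0 n 1).foldl (fun acc i =>
        (PySem.List.pyRange 0 n 1).foldl (fun acc j =>
          if i + j = s then acc ++ [(i, j)] else acc) acc) acc
      = acc ++ (PySem.List.pyRange (max 0 (s - n + 1)) (min n (s + 1)) 1).map
          (fun i => (i, s - i)) := by
  simp only [pv_inner]
  rw [PySem.List.foldl_append_ite (p := fun i => 0 ≤ s - i ∧ s - i < n)
        (f := fun i => ((i, s - i) : Int × Int))]
  have hf : (PySem.List.pyRange 0 n 1).filter (fun i => decide (0 ≤ s - i ∧ s - i < n))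
      = PySem.List.pyRange (max 0 (s - n + 1)) (min n (s + 1)) 1 := by
    rw [List.filter_congr (fun i _ =>
      decide_eq_decide.mpr (by omega : (0 ≤ s - i ∧ s - i < n) ↔ (s - n + 1 ≤ i ∧ i < s + 1)))]
    exact pv_filter_window 0 n (s - n + 1) (s + 1)
  rw [hf]

-- ===== VERDICT (by name: the statement is the Claim_ definition above) =====
theorem GrowingSum_spec : Claim_equal_GrowingSum := by
  intro n _
  show GrowingSum n = GrowingSum_alt n
  unfold GrowingSum GrowingSum_alt
  simp only [pv_body]
  rw [PySem.List.foldl_append_eq_flatMap]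
  simp
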